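-- pv_equiv track=rewrite | github.com/lkcbharath/Lab_Assignments | 4th Semester/IT250 OS/Lab 6/opt_ram.py | opt_index
-- ===== SOURCE A (Python) =====
-- def opt_index(ram,ref_list):
--     ram_in_ref_list = []
--     for i in range(len(ram)):
--         if ram[i] in ref_list and ref_list.index(ram[i]):
--             ram_in_ref_list.append(ref_list.index(ram[i]))
--         else:
--             ram_in_ref_list.append(-1)
--
--     if -1 in ram_in_ref_list:
--         return ram_in_ref_list.index(-1)
--
--     return ram_in_ref_list.index(max(ram_in_ref_list))
-- ===== SOURCE B (Python) =====
-- def opt_index(ram, ref_list):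
--     # single pass: break at the first page with position 0/absent (A's -1), else track first max
--     best_pos = 0
--     best_i = 0
--     for i, x in enumerate(ram):
--         p = ref_list.index(x) if x in ref_list else 0
--         if p == 0:
--             return i
--         if p > best_pos:
--             best_pos, best_i = p, i
--     return best_i
-- ===== Notes on version B (the rewrite author's own statement) =====
-- stated objective: faster
-- what changed: A builds an intermediate position list and then scans it up to three more times (membership test for -1, list.index(-1), max plus list.index(max)); B is a single pass over ram that returns immediately at the first absent/position-0 page and otherwise tracks the running maximum position and the index of its first occurrence, so no intermediate list and no extra scans are needed.
import Mathlib
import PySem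

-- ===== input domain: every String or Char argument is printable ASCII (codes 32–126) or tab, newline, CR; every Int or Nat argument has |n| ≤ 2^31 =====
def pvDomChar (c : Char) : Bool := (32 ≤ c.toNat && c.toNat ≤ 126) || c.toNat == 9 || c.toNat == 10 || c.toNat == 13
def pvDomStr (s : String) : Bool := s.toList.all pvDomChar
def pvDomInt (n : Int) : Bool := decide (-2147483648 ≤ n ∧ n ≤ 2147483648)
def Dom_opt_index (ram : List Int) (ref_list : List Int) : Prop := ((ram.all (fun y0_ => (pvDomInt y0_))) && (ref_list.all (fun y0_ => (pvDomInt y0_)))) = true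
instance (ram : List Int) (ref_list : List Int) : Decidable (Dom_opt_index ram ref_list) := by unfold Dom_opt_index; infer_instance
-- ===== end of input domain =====

-- B replaces A's build-a-list-then-two-scans with a single pass over ram that
-- breaks at the first absent/position-0 page and otherwise tracks the first
-- running maximum (objective: simpler one-pass decomposition).


-- ===== PORT A =====
def opt_index (ram : List Int) (ref_list : List Int) : Int :=
  -- for i in range(len(ram)): build ram_in_ref_list
  let l : List Int :=
    (PySem.List.pyRange 0 (ram.length : Int) 1).foldl (fun acc i =>
      let x := PySem.List.pyGetD ram i 0   -- ram[i]; i always in range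
      if ref_list.contains x && !(((PySem.List.index? ref_list x).getD 0 : Int) == 0)
      then acc ++ [((PySem.List.index? ref_list x).getD 0 : Int)]
      else acc ++ [(-1 : Int)]) []
  if l.contains (-1) then ((PySem.List.index? l (-1)).getD 0 : Int)
  else
    match PySem.List.max? l (fun y => y) with
    | some m => ((PySem.List.index? l m).getD 0 : Int)
    | none => 0   -- max([]) raises ValueError in Python; ram = [] is excluded by Pre_

-- ===== PORT B =====
def optLoopB (ref_list : List Int) : List (Int × Int) → Int → Int → Int
  | [], _, best_i => best_i
  | (i, x) :: rest, best_pos, best_i =>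
      let p : Int := if ref_list.contains x then ((PySem.List.index? ref_list x).getD 0 : Int) else 0
      if p == 0 then i
      else if p > best_pos then optLoopB ref_list rest p i
      else optLoopB ref_list rest best_pos best_i

def opt_index_alt (ram : List Int) (ref_list : List Int) : Int :=
  optLoopB ref_list (PySem.List.enumerate ram 0) 0 0

-- ===== PRECONDITION & SPEC =====
-- Pre_ excludes exactly ram = [], on which Python A raises ValueError (max of an empty list).
def Pre_opt_index (ram : List Int) (ref_list : List Int) : Prop := ram ≠ []
instance (ram : List Int) (ref_list : List Int) : Decidable (Pre_opt_index ram ref_list) := by unfold Pre_opt_index; infer_instance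
def pvWitness_opt_index : List Int × List Int := ([3, 1, 2], [1, 2, 3])

def Spec_opt_index (ram : List Int) (ref_list : List Int) (out : Int) : Prop := out = opt_index_alt ram ref_list
instance (ram : List Int) (ref_list : List Int) (out : Int) : Decidable (Spec_opt_index ram ref_list out) := by unfold Spec_opt_index; infer_instance

-- ===== CLAIM (what is proved, stated in full; the proofs are below) =====
def Claim_equal_opt_index : Prop := ∀ (ram : List Int) (ref_list : List Int), Dom_opt_index ram ref_list → Pre_opt_index ram ref_list → Spec_opt_index ram ref_list (opt_index ram ref_list)

-- ===== LEMMAS AND PROOFS =====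

-- the position value both programs attach to a page x
def posOf (ref_list : List Int) (x : Int) : Int :=
  if ref_list.contains x then ((PySem.List.index? ref_list x).getD 0 : Int) else 0

lemma posOf_nonneg (ref_list : List Int) (x : Int) : 0 ≤ posOf ref_list x := by
  unfold posOf; split <;> positivity

-- abstract single-pass loop over the position values
def loopP : List Int → Int → Int → Int → Int
  | [], _, _, bi => bi
  | q :: rest, i, bp, bi =>
      if q = 0 then i
      else if q > bp then loopP rest (i + 1) q i
      else loopP rest (i + 1) bp bi

lemma optLoopB_eq_loopP (ref_list : List Int) (ram : List Int) :
    ∀ (s bp bi : Int),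
      optLoopB ref_list (PySem.List.enumerate ram s) bp bi
        = loopP (ram.map (posOf ref_list)) s bp bi := by
  induction ram with
  | nil => intro s bp bi; simp [PySem.List.enumerate_nil, optLoopB, loopP]
  | cons x rest ih =>
      intro s bp bi
      rw [PySem.List.enumerate_cons]
      simp only [optLoopB, List.map_cons, loopP, posOf, beq_iff_eq]
      by_cases hc : ref_list.contains x = true
      · simp only [hc, if_true]
        split_ifs <;> first | rfl | exact ih _ _ _
      · simp only [hc]
        split_ifs <;> first | rfl | exact ih _ _ _

lemma foldl_max_self_or_mem : ∀ (P : List Int) (b : Int),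
    P.foldl max b = b ∨ P.foldl max b ∈ P := by
  intro P
  induction P with
  | nil => intro b; left; rfl
  | cons q rest ih =>
      intro b
      rcases ih (max b q) with h | h
      · rw [List.foldl_cons, h]
        rcases le_total b q with hq | hq
        · right; simp [max_eq_right hq]
        · left; simp [max_eq_left hq]
      · right; simp [List.foldl_cons, h]

lemma le_foldl_max' : ∀ (P : List Int) (b : Int), b ≤ P.foldl max b := by
  intro P
  induction P with
  | nil => intro b; exact le_refl b
  | cons q rest ih =>
      intro b
      calc b ≤ max b q := le_max_left _ _
        _ ≤ rest.foldl max (max b q) := ih _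
        _ = (q :: rest).foldl max b := rfl

-- the heart: what the single pass computes, for arbitrary accumulators
lemma loopP_spec : ∀ (P : List Int) (i bp bi : Int),
    loopP P i bp bi =
      if P.contains 0 then i + ((PySem.List.index? P 0).getD 0 : Int)
      else if bp < P.foldl max bp then i + ((PySem.List.index? P (P.foldl max bp)).getD 0 : Int)
      else bi := by
  intro P
  induction P with
  | nil => intro i bp bi; simp [loopP]
  | cons q rest ih =>
      intro i bp bi
      by_cases hq : q = 0
      · subst hq
        simp [loopP]
      · simp only [loopP, if_neg hq]
        have h0q : ((0 : Int) == q) = false := beq_eq_false_iff_ne.mpr (fun h => hq h.symm)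
        have hcc : ((q :: rest).contains (0 : Int)) = (rest.contains (0 : Int)) := by
          simp only [List.contains_cons, h0q, Bool.false_or]
        by_cases h0 : rest.contains (0 : Int) = true
        · obtain ⟨k, hk⟩ : ∃ k, PySem.List.index? rest 0 = some k := by
            refine Option.isSome_iff_exists.mp ?_
            exact (PySem.List.index?_isSome_iff _ _).mpr (by simpa using h0)
          have hcons : PySem.List.index? (q :: rest) 0 = some (k + 1) := by
            rw [PySem.List.index?_cons_of_ne (xs := rest) hq, hk]; rfl
          by_cases hgt : q > bp
          · rw [if_pos hgt, ih]
            simp only [hcc, h0, hcons, hk, if_true, Option.getD_some]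
            omega
          · rw [if_neg hgt, ih]
            simp only [hcc, h0, hcons, hk, if_true, Option.getD_some]
            omega
        · have h0' : rest.contains (0 : Int) = false := by simpa using h0
          by_cases hgt : q > bp
          · rw [if_pos hgt, ih]
            have hM : List.foldl max bp (q :: rest) = List.foldl max q rest := by
              rw [List.foldl_cons, max_eq_right (le_of_lt hgt)]
            have hqM : q ≤ List.foldl max q rest := le_foldl_max' rest q
            simp only [hcc, h0', if_false, Bool.false_eq_true, hM]
            by_cases hlt : q < List.foldl max q rest
            · rcases foldl_max_self_or_mem rest q with he | hm
              · omega
              · obtain ⟨k', hk'⟩ : ∃ k', PySem.List.index? rest (List.foldl max q rest) = some k' := by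
                  refine Option.isSome_iff_exists.mp ?_
                  exact (PySem.List.index?_isSome_iff _ _).mpr hm
                have hne : q ≠ List.foldl max q rest := ne_of_lt hlt
                have hcons' : PySem.List.index? (q :: rest) (List.foldl max q rest) = some (k' + 1) := by
                  rw [PySem.List.index?_cons_of_ne (xs := rest) hne, hk']; rfl
                rw [if_pos hlt, if_pos (show bp < List.foldl max q rest by omega)]
                simp only [hk', hcons', Option.getD_some]
                omega
            · have heq : List.foldl max q rest = q := le_antisymm (not_lt.mp hlt) hqM
              rw [if_neg hlt, if_pos (show bp < List.foldl max q rest by omega), heq,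
                PySem.List.index?_cons_self]
              simp
          · rw [if_neg hgt, ih]
            have hbpq : q ≤ bp := not_lt.mp hgt
            have hM : List.foldl max bp (q :: rest) = List.foldl max bp rest := by
              rw [List.foldl_cons, max_eq_left hbpq]
            simp only [hcc, h0', if_false, Bool.false_eq_true, hM]
            by_cases hlt : bp < List.foldl max bp rest
            · rcases foldl_max_self_or_mem rest bp with he | hm
              · omega
              · obtain ⟨k', hk'⟩ : ∃ k', PySem.List.index? rest (List.foldl max bp rest) = some k' := by
                  refine Option.isSome_iff_exists.mp ?_
                  exact (PySem.List.index?_isSome_iff _ _).mpr hm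
                have hne : q ≠ List.foldl max bp rest := by omega
                have hcons' : PySem.List.index? (q :: rest) (List.foldl max bp rest) = some (k' + 1) := by
                  rw [PySem.List.index?_cons_of_ne (xs := rest) hne, hk']; rfl
                rw [if_pos hlt, if_pos hlt]
                simp only [hk', hcons', Option.getD_some]
                omega
            · rw [if_neg hlt, if_neg hlt]

def toL (q : Int) : Int := if q = 0 then -1 else q

lemma l_eq_map (ram ref_list : List Int) :
    (PySem.List.pyRange 0 (ram.length : Int) 1).foldl (fun acc i =>
      let x := PySem.List.pyGetD ram i 0
      if ref_list.contains x && !(((PySem.List.index? ref_list x).getD 0 : Int) == 0)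
      then acc ++ [((PySem.List.index? ref_list x).getD 0 : Int)]
      else acc ++ [(-1 : Int)]) []
    = ram.map (fun x => toL (posOf ref_list x)) := by
  have hstep : ∀ (acc : List Int) (x : Int),
      (if ref_list.contains x && !(((PySem.List.index? ref_list x).getD 0 : Int) == 0)
       then acc ++ [((PySem.List.index? ref_list x).getD 0 : Int)]
       else acc ++ [(-1 : Int)]) = acc ++ [toL (posOf ref_list x)] := by
    intro acc x
    by_cases hc : ref_list.contains x = true
    · by_cases hz : ((PySem.List.index? ref_list x).getD 0 : Int) = 0
      · have hb : (((PySem.List.index? ref_list x).getD 0 : Int) == 0) = true := beq_iff_eq.mpr hz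
        have h1 : toL (posOf ref_list x) = -1 := by
          unfold toL posOf
          rw [if_pos hc, if_pos hz]
        rw [h1, hc, hb]
        simp
      · have hb : (((PySem.List.index? ref_list x).getD 0 : Int) == 0) = false :=
          beq_eq_false_iff_ne.mpr hz
        have h1 : toL (posOf ref_list x) = ((PySem.List.index? ref_list x).getD 0 : Int) := by
          unfold toL posOf
          rw [if_pos hc, if_neg hz]
        rw [h1, hc, hb]
        simp
    · have hc' : ref_list.contains x = false := by simpa using hc
      have h1 : toL (posOf ref_list x) = -1 := by
        unfold toL posOf
        rw [if_neg hc, if_pos rfl]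
      rw [h1, hc']
      simp
  rw [PySem.List.foldl_pyRange_zero_pyGetD' ram 0 (fun acc x =>
      if ref_list.contains x && !(((PySem.List.index? ref_list x).getD 0 : Int) == 0)
      then acc ++ [((PySem.List.index? ref_list x).getD 0 : Int)]
      else acc ++ [(-1 : Int)]) []]
  induction ram using List.reverseRecOn with
  | nil => rfl
  | append_singleton rs x ih =>
      rw [List.foldl_append, List.foldl_cons, List.foldl_nil, ih, List.map_append, List.map_cons,
        List.map_nil, hstep]

lemma index?_map_toL : ∀ (P : List Int), (∀ q ∈ P, 0 ≤ q) →
    PySem.List.index? (P.map toL) (-1) = PySem.List.index? P 0 := by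
  intro P
  induction P with
  | nil => intro _; rfl
  | cons q rest ih =>
      intro h
      have hq0 : 0 ≤ q := h q List.mem_cons_self
      by_cases hq : q = 0
      · subst hq
        rw [List.map_cons, show toL 0 = -1 from rfl, PySem.List.index?_cons_self,
          PySem.List.index?_cons_self]
      · have htq : toL q = q := by simp [toL, hq]
        have hne1 : q ≠ (-1 : Int) := by omega
        rw [List.map_cons, htq, PySem.List.index?_cons_of_ne (xs := List.map toL rest) hne1,
          PySem.List.index?_cons_of_ne (xs := rest) hq, ih (fun y hy => h y (List.mem_cons_of_mem _ hy))]

lemma contains_map_toL : ∀ (P : List Int), (∀ q ∈ P, 0 ≤ q) →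
    ((P.map toL).contains (-1)) = (P.contains 0) := by
  intro P
  induction P with
  | nil => intro _; rfl
  | cons q rest ih =>
      intro h
      have hq0 : 0 ≤ q := h q List.mem_cons_self
      by_cases hq : q = 0
      · subst hq
        simp [toL]
      · have htq : toL q = q := by simp [toL, hq]
        rw [List.map_cons, htq, List.contains_cons, List.contains_cons,
          ih (fun y hy => h y (List.mem_cons_of_mem _ hy))]
        have h1 : ((-1 : Int) == q) = false := beq_eq_false_iff_ne.mpr (by omega)
        have h2 : ((0 : Int) == q) = false := beq_eq_false_iff_ne.mpr (fun e => hq e.symm)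
        rw [h1, h2]

lemma map_toL_no_zero : ∀ (P : List Int), (0 : Int) ∉ P → P.map toL = P := by
  intro P
  induction P with
  | nil => intro _; rfl
  | cons q rest ih =>
      intro h
      have hq : q ≠ 0 := fun e => h (e ▸ List.mem_cons_self)
      rw [List.map_cons, show toL q = q by simp [toL, hq],
        ih (fun hm => h (List.mem_cons_of_mem _ hm))]

-- ===== VERDICT (by name: the statement is the Claim_ definition above) =====
theorem opt_index_spec : Claim_equal_opt_index := by
  intro ram ref_list _ hpre
  unfold Spec_opt_index
  have hP : ∀ q ∈ ram.map (posOf ref_list), 0 ≤ q := by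
    intro q hq
    obtain ⟨x, _, rfl⟩ := List.mem_map.mp hq
    exact posOf_nonneg ref_list x
  have hB : opt_index_alt ram ref_list =
      (if (ram.map (posOf ref_list)).contains 0 then
        (0 : Int) + ((PySem.List.index? (ram.map (posOf ref_list)) 0).getD 0 : Int)
      else if (0 : Int) < (ram.map (posOf ref_list)).foldl max 0 then
        (0 : Int) + ((PySem.List.index? (ram.map (posOf ref_list))
          ((ram.map (posOf ref_list)).foldl max 0)).getD 0 : Int)
      else 0) := by
    unfold opt_index_alt
    rw [optLoopB_eq_loopP, loopP_spec]
  have hmm : ram.map (fun x => toL (posOf ref_list x)) = (ram.map (posOf ref_list)).map toL := by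
    rw [List.map_map]; rfl
  have hA : opt_index ram ref_list =
      (if ((ram.map (posOf ref_list)).map toL).contains (-1) then
        ((PySem.List.index? ((ram.map (posOf ref_list)).map toL) (-1)).getD 0 : Int)
      else
        match PySem.List.max? ((ram.map (posOf ref_list)).map toL) (fun y => y) with
        | some m => ((PySem.List.index? ((ram.map (posOf ref_list)).map toL) m).getD 0 : Int)
        | none => 0) := by
    unfold opt_index
    rw [l_eq_map, hmm]
  rw [hA, hB]
  by_cases h0 : (ram.map (posOf ref_list)).contains 0 = true
  · rw [if_pos h0, if_pos (by rw [contains_map_toL _ hP]; exact h0),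
      index?_map_toL _ hP]
    omega
  · have h0' : ((ram.map (posOf ref_list)).contains 0) = false := by simpa using h0
    have h0m : (0 : Int) ∉ ram.map (posOf ref_list) := by simpa using h0'
    rw [if_neg (by rw [contains_map_toL _ hP]; exact h0), if_neg (by simp only [h0', Bool.false_eq_true]; exact not_false),
      map_toL_no_zero _ h0m]
    obtain ⟨r, rs, rfl⟩ : ∃ r rs, ram = r :: rs := by
      cases ram with
      | nil => exact absurd rfl hpre
      | cons r rs => exact ⟨r, rs, rfl⟩
    rw [List.map_cons, PySem.List.max?_id_cons]
    have hp0 : 0 ≤ posOf ref_list r := posOf_nonneg ref_list r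
    have hpne : posOf ref_list r ≠ 0 := by
      intro e
      exact h0m (by rw [List.map_cons, ← e]; exact List.mem_cons_self)
    have hfold : List.foldl max 0 (posOf ref_list r :: rs.map (posOf ref_list))
        = List.foldl max (posOf ref_list r) (rs.map (posOf ref_list)) := by
      rw [List.foldl_cons, max_eq_right hp0]
    have hle : posOf ref_list r ≤ List.foldl max (posOf ref_list r) (rs.map (posOf ref_list)) :=
      le_foldl_max' _ _
    rw [hfold, if_pos (by omega)]
    simp
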